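-- pv_equiv track=rewrite | github.com/k-harada/AtCoder | ARC/ARC148/D.py | solve
-- ===== SOURCE A (Python) =====
-- from collections import defaultdict
--
-- def solve(n, m, a_list):
--     count_dict = defaultdict(int)
--     for a in a_list:
--         count_dict[a] += 1
--
--     if m % 2 == 1:
--         for a in count_dict.keys():
--             if count_dict[a] % 2 == 1:
--                 return "Alice"
--     else:
--         d = m // 2
--         c = 0
--         for a in count_dict.keys():
--             if count_dict[a] % 2 == 1:
--                 if count_dict[(a + d) % m] % 2 == 1:
--                     c += 1
--                 else:
--                     return "Alice"
--         if c % 4 != 0: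
--             return "Alice"
--     return "Bob"
-- ===== SOURCE B (Python) =====
-- def solve(n, m, a_list):
--     # Sort, then scan runs of equal values to collect the odd-multiplicity values;
--     # decide the even-m case declaratively with an image-set subset test.
--     s = sorted(a_list)
--     odd = set()
--     i = 0
--     while i < len(s):
--         j = i + 1
--         while j < len(s) and s[j] == s[i]:
--             j += 1
--         if (j - i) % 2 == 1:
--             odd.add(s[i])
--         i = j
--     if m % 2 == 1:
--         return "Alice" if odd else "Bob"
--     ok = {(a + m // 2) % m for a in odd} <= odd and len(odd) % 4 == 0
--     return "Bob" if ok else "Alice"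
-- ===== Notes on version B (the rewrite author's own statement) =====
-- stated objective: alternative
-- what changed: B sorts the list and finds odd-multiplicity values by scanning runs of equal elements (no count dict or parity structure is built during input traversal), and replaces A's early-return key loop and running counter with a declarative test: the half-rotation image set must be a subset of the odd set and its size divisible by 4.
import Mathlib
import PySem

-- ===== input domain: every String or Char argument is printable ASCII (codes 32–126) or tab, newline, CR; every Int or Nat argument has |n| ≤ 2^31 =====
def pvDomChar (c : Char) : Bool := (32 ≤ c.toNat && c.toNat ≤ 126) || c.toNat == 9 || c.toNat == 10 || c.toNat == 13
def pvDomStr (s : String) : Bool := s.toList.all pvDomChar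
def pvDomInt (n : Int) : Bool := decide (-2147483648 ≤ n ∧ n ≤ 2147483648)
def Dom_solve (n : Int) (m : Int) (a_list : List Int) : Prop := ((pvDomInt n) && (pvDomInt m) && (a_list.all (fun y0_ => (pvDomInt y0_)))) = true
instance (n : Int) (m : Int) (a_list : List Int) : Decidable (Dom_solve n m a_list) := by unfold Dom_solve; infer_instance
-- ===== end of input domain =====

-- B sorts the list and collects odd-multiplicity values by scanning runs of equal elements,
-- then decides the even-m case by an image-set subset test plus a size-mod-4 test (objective: alternative).
-- Pre_solve excludes only the inputs where the Python A raises ZeroDivisionError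
-- (m = 0 together with some value of odd multiplicity); B raises there too.


-- ===== PORT A =====
-- count_dict built by the counting loop (defaultdict(int); count_dict[a] += 1)
def aCountDict (a_list : List Int) : PySem.Dict Int Int :=
  a_list.foldl (fun dd a => dd.modify a 0 (· + 1)) PySem.Dict.empty

-- the odd-m loop over count_dict.keys(); falls through to the final `return "Bob"`
def aOddLoop (dd : PySem.Dict Int Int) : List Int → String
  | [] => "Bob"
  | a :: rest =>
      if PySem.Int.mod (dd.getD a 0) 2 == 1 then "Alice" else aOddLoop dd rest

-- the even-m loop; `count_dict[(a+d)%m]` on a missing key yields the default 0 and the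
-- branch returns at once, so reading with default 0 is exact
def aEvenLoop (dd : PySem.Dict Int Int) (m d : Int) (c : Int) : List Int → String
  | [] => if PySem.Int.mod c 4 ≠ 0 then "Alice" else "Bob"
  | a :: rest =>
      if PySem.Int.mod (dd.getD a 0) 2 == 1 then
        if PySem.Int.mod (dd.getD (PySem.Int.mod (a + d) m) 0) 2 == 1 then
          aEvenLoop dd m d (c + 1) rest
        else "Alice"
      else aEvenLoop dd m d c rest

def solve (n : Int) (m : Int) (a_list : List Int) : String :=
  let count_dict := aCountDict a_list
  if PySem.Int.mod m 2 == 1 then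
    aOddLoop count_dict count_dict.keys
  else
    aEvenLoop count_dict m (PySem.Int.floordiv m 2) 0 count_dict.keys

-- ===== PORT B =====
-- the run scan over the sorted list: i/j walk runs of equal values; the run starting at x
-- inside x :: rest has length 1 + |takeWhile (== x) rest| (= j - i) and the scan resumes at
-- the dropWhile remainder (= index j); odd-length runs add their value to `odd`
def bScan (s : List Int) (odd : PySem.Set Int) : PySem.Set Int :=
  match s with
  | [] => odd
  | x :: rest =>
      bScan (rest.dropWhile (fun y => y == x))
        (if ((rest.takeWhile (fun y => y == x)).length + 1) % 2 = 1 then PySem.Set.add odd x else odd)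
termination_by s.length
decreasing_by
  simp only [List.length_cons]
  have := List.length_dropWhile_le (fun y => y == x) rest
  omega

def solve_alt (n : Int) (m : Int) (a_list : List Int) : String :=
  let s := PySem.List.sorted a_list (fun x => x) false
  let odd := bScan s PySem.Set.empty
  if PySem.Int.mod m 2 == 1 then
    if odd ≠ [] then "Alice" else "Bob"
  else
    if PySem.Set.issubset
         (PySem.Set.ofList (odd.map (fun a => PySem.Int.mod (a + PySem.Int.floordiv m 2) m))) odd
       && (PySem.Int.mod (PySem.Set.len odd) 4 == 0)
    then "Bob" else "Alice"

-- ===== PRECONDITION & SPEC =====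
-- Pre_ excludes exactly the inputs where Python A raises ZeroDivisionError at (a+d)%m:
-- m = 0 with some element of odd multiplicity (B raises there as well).
def Pre_solve (n : Int) (m : Int) (a_list : List Int) : Prop :=
  m ≠ 0 ∨ ∀ x ∈ a_list, 2 ∣ a_list.count x
instance (n : Int) (m : Int) (a_list : List Int) : Decidable (Pre_solve n m a_list) := by
  unfold Pre_solve; infer_instance

def pvWitness_solve : Int × Int × List Int := (3, 4, [1, 3, 1, 2])

def Spec_solve (n : Int) (m : Int) (a_list : List Int) (out : String) : Prop := out = solve_alt n m a_list
instance (n : Int) (m : Int) (a_list : List Int) (out : String) : Decidable (Spec_solve n m a_list out) := by unfold Spec_solve; infer_instance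

-- ===== CLAIM (what is proved, stated in full; the proofs are below) =====
def Claim_equal_solve : Prop := ∀ (n : Int) (m : Int) (a_list : List Int), Dom_solve n m a_list → Pre_solve n m a_list → Spec_solve n m a_list (solve n m a_list)

-- ===== LEMMAS AND PROOFS =====

-- run-scan invariant on a sorted list: the result extends acc by exactly the odd-count values
lemma bScan_invariant (s : List Int) (acc : PySem.Set Int) (hs : s.Pairwise (· ≤ ·)) :
    (acc.Nodup → (bScan s acc).Nodup) ∧
    (∀ x, x ∈ bScan s acc ↔ x ∈ acc ∨ ¬ 2 ∣ s.count x) := by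
  induction s, acc using bScan.induct with
  | case1 acc => simp [bScan]
  | case2 acc a rest ih =>
    have hrest : rest.Pairwise (· ≤ ·) := hs.of_cons
    have hle : ∀ y ∈ rest, a ≤ y := fun y hy => (List.pairwise_cons.mp hs).1 y hy
    have hsplit : rest.takeWhile (fun y => y == a) ++ rest.dropWhile (fun y => y == a) = rest :=
      List.takeWhile_append_dropWhile
    have hrest'sorted : (rest.dropWhile (fun y => y == a)).Pairwise (· ≤ ·) :=
      hrest.sublist (List.dropWhile_sublist _)
    have hanot : a ∉ rest.dropWhile (fun y => y == a) := by
      intro hmem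
      cases hr' : rest.dropWhile (fun y => y == a) with
      | nil => rw [hr'] at hmem; cases hmem
      | cons b t =>
        have hbne : (b == a) = false := by
          have h2 := List.head?_dropWhile_not (fun y => y == a) rest
          rw [hr'] at h2
          simpa using h2
        have hab : a ≤ b := hle b (by
          rw [← hsplit, hr']
          exact List.mem_append_right _ List.mem_cons_self)
        have hba : ¬ b = a := by simpa using hbne
        have halt : a < b := lt_of_le_of_ne hab (Ne.symm hba)
        rw [hr'] at hmem
        rcases List.mem_cons.mp hmem with h | h
        · exact absurd h (ne_of_lt halt)
        · have hbt : b ≤ a := (List.pairwise_cons.mp (hr' ▸ hrest'sorted)).1 a h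
          omega
    have hcount_a : (a :: rest).count a = (rest.takeWhile (fun y => y == a)).length + 1 := by
      have h1 : (rest.takeWhile (fun y => y == a)).count a = (rest.takeWhile (fun y => y == a)).length :=
        List.count_eq_length.mpr (fun y hy =>
          (beq_iff_eq.mp (List.mem_takeWhile_imp (p := fun y => y == a) hy)).symm)
      have h2 : (rest.dropWhile (fun y => y == a)).count a = 0 := List.count_eq_zero_of_not_mem hanot
      have h3 : (rest.takeWhile (fun y => y == a)).count a + (rest.dropWhile (fun y => y == a)).count a = rest.count a := by
        rw [← List.count_append, hsplit]
      rw [List.count_cons_self]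
      omega
    have hcount_ne : ∀ x, x ≠ a → (a :: rest).count x = (rest.dropWhile (fun y => y == a)).count x := by
      intro x hx
      have h1 : (rest.takeWhile (fun y => y == a)).count x = 0 := by
        apply List.count_eq_zero_of_not_mem
        intro hy
        exact hx (beq_iff_eq.mp (List.mem_takeWhile_imp (p := fun y => y == a) hy))
      have h2 : (rest.takeWhile (fun y => y == a)).count x + (rest.dropWhile (fun y => y == a)).count x = rest.count x := by
        rw [← List.count_append, hsplit]
      rw [List.count_cons_of_ne (by simpa [eq_comm] using hx)]
      omega
    simp only [dite_eq_ite] at ih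
    obtain ⟨ihnd, ihmem⟩ := ih hrest'sorted
    rw [bScan]
    refine ⟨fun hnd => ihnd ?_, ?_⟩
    · by_cases hpar : ((rest.takeWhile (fun y => y == a)).length + 1) % 2 = 1
      · rw [if_pos hpar]; exact PySem.Set.nodup_add acc a hnd
      · rwa [if_neg hpar]
    · intro x
      rw [ihmem x]
      by_cases hxa : x = a
      · subst hxa
        rw [List.count_eq_zero_of_not_mem hanot, hcount_a]
        by_cases hpar : ((rest.takeWhile (fun y => y == x)).length + 1) % 2 = 1
        · have hodd : ¬ 2 ∣ ((rest.takeWhile (fun y => y == x)).length + 1) := by omega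
          simp only [if_pos hpar, PySem.Set.mem_add]
          tauto
        · have hev : 2 ∣ ((rest.takeWhile (fun y => y == x)).length + 1) := by omega
          simp only [if_neg hpar]
          simp [hev]
      · rw [hcount_ne x hxa]
        by_cases hpar : ((rest.takeWhile (fun y => y == a)).length + 1) % 2 = 1
        · simp only [if_pos hpar, PySem.Set.mem_add]
          tauto
        · simp only [if_neg hpar]

lemma mem_bOdd (a_list : List Int) (x : Int) :
    x ∈ bScan (PySem.List.sorted a_list (fun x => x) false) PySem.Set.empty ↔
      ¬ 2 ∣ a_list.count x := by
  have hp : (PySem.List.sorted a_list (fun x => x) false).Pairwise (· ≤ ·) := by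
    simpa using PySem.List.sorted_pairwise a_list (fun x => x)
  have h := (bScan_invariant (PySem.List.sorted a_list (fun x => x) false) PySem.Set.empty hp).2 x
  rw [(PySem.List.sorted_perm a_list (fun x => x) false).count_eq x] at h
  simpa [PySem.Set.empty] using h

lemma nodup_bOdd (a_list : List Int) :
    (bScan (PySem.List.sorted a_list (fun x => x) false) PySem.Set.empty).Nodup := by
  have hp : (PySem.List.sorted a_list (fun x => x) false).Pairwise (· ≤ ·) := by
    simpa using PySem.List.sorted_pairwise a_list (fun x => x)
  exact (bScan_invariant _ PySem.Set.empty hp).1 (by simp [PySem.Set.empty])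

lemma aCountDict_eq (a_list : List Int) : aCountDict a_list = PySem.Dict.counter a_list := by
  rw [PySem.Dict.counter_eq_foldl]; rfl

-- the Bool test `count % 2 == 1` is oddness of the Nat count
lemma modBit (c : Nat) : (PySem.Int.mod (c : Int) 2 == 1) = true ↔ ¬ 2 ∣ c := by
  rw [PySem.Int.mod_eq_emod_of_pos (by norm_num), beq_iff_eq]
  omega

lemma aOddLoop_eq (dd : PySem.Dict Int Int) (l : List Int) :
    aOddLoop dd l = if l.any (fun a => PySem.Int.mod (dd.getD a 0) 2 == 1) then "Alice" else "Bob" := by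
  induction l with
  | nil => simp [aOddLoop]
  | cons a rest ih =>
    rw [aOddLoop, List.any_cons, ih]
    cases hb : (PySem.Int.mod (dd.getD a 0) 2 == 1) <;> simp

lemma aEvenLoop_eq (dd : PySem.Dict Int Int) (m d : Int) (l : List Int) (c : Int) :
    aEvenLoop dd m d c l =
      if l.any (fun a => (PySem.Int.mod (dd.getD a 0) 2 == 1) &&
          !(PySem.Int.mod (dd.getD (PySem.Int.mod (a + d) m) 0) 2 == 1)) then "Alice"
      else if PySem.Int.mod (c + (l.countP (fun a => (PySem.Int.mod (dd.getD a 0) 2 == 1) &&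
          (PySem.Int.mod (dd.getD (PySem.Int.mod (a + d) m) 0) 2 == 1)) : Nat)) 4 ≠ 0 then "Alice"
      else "Bob" := by
  induction l generalizing c with
  | nil => simp [aEvenLoop]
  | cons a rest ih =>
    rw [aEvenLoop, List.any_cons, List.countP_cons]
    cases hp : (PySem.Int.mod (dd.getD a 0) 2 == 1)
    · rw [ih c]
      simp
    · cases hq : (PySem.Int.mod (dd.getD (PySem.Int.mod (a + d) m) 0) 2 == 1)
      · simp
      · rw [ih (c + 1)]
        have hrw : ∀ k : Nat, c + 1 + (k : Int) = c + ((k + 1 : Nat) : Int) := by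
          intro k; push_cast; ring
        simp [hrw]

-- ===== VERDICT (by name: the statement is the Claim_ definition above) =====
theorem solve_spec : Claim_equal_solve := by
  intro n m a_list _ hpre
  unfold Spec_solve solve solve_alt
  simp only [aCountDict_eq, PySem.Dict.keys_counter]
  set K := PySem.Set.ofList a_list with hK
  set O := bScan (PySem.List.sorted a_list (fun x => x) false) PySem.Set.empty with hO
  have hKnd : K.Nodup := PySem.Set.nodup_ofList a_list
  have hOnd : O.Nodup := nodup_bOdd a_list
  have hKmem : ∀ x, x ∈ K ↔ x ∈ a_list := fun x => PySem.Set.mem_ofList a_list x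
  have hOmem : ∀ x, x ∈ O ↔ ¬ 2 ∣ a_list.count x := fun x => mem_bOdd a_list x
  have hgetD : ∀ x, (PySem.Dict.counter a_list).getD x 0 = (a_list.count x : Int) :=
    fun x => by simp [PySem.Dict.getD_counter]
  have hP : ∀ x, (PySem.Int.mod ((PySem.Dict.counter a_list).getD x 0) 2 == 1) = true ↔
      ¬ 2 ∣ a_list.count x := by
    intro x; rw [hgetD x]; exact modBit _
  have hOsub : ∀ x, ¬ 2 ∣ a_list.count x → x ∈ a_list := by
    intro x hx
    by_contra hmem
    exact hx (by simp [List.count_eq_zero_of_not_mem hmem])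
  by_cases hm : (PySem.Int.mod m 2 == 1) = true
  · -- odd m
    rw [if_pos hm, if_pos hm, aOddLoop_eq]
    by_cases hany : K.any (fun a => PySem.Int.mod ((PySem.Dict.counter a_list).getD a 0) 2 == 1) = true
    · rw [if_pos hany]
      obtain ⟨a, haK, haP⟩ := List.any_eq_true.mp hany
      have : a ∈ O := (hOmem a).mpr ((hP a).mp haP)
      rw [if_pos (fun h => by rw [h] at this; simp at this)]
    · rw [if_neg hany]
      have : O = [] := by
        by_contra hne
        obtain ⟨a, ha⟩ := List.exists_mem_of_ne_nil O hne
        have hodd := (hOmem a).mp ha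
        exact hany (List.any_eq_true.mpr ⟨a, (hKmem a).mpr (hOsub a hodd), (hP a).mpr hodd⟩)
      simp [this]
  · -- even m
    rw [if_neg hm, if_neg hm, aEvenLoop_eq]
    set d := PySem.Int.floordiv m 2 with hd
    have hQ : ∀ x, (PySem.Int.mod ((PySem.Dict.counter a_list).getD (PySem.Int.mod (x + d) m) 0) 2 == 1) = true ↔
        PySem.Int.mod (x + d) m ∈ O := by
      intro x; rw [hP, hOmem]
    -- B's subset test, unfolded to a statement about O
    have hsubset : PySem.Set.issubset (PySem.Set.ofList (O.map (fun a => PySem.Int.mod (a + d) m))) O = true ↔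
        ∀ a ∈ O, PySem.Int.mod (a + d) m ∈ O := by
      rw [PySem.Set.issubset_iff]
      constructor
      · intro h a haO
        exact h _ ((PySem.Set.mem_ofList _ _).mpr (List.mem_map_of_mem haO))
      · intro h x hx
        obtain ⟨a, haO, rfl⟩ := List.mem_map.mp ((PySem.Set.mem_ofList _ _).mp hx)
        exact h a haO
    by_cases hany : K.any (fun a => (PySem.Int.mod ((PySem.Dict.counter a_list).getD a 0) 2 == 1) &&
        !(PySem.Int.mod ((PySem.Dict.counter a_list).getD (PySem.Int.mod (a + d) m) 0) 2 == 1)) = true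
    · rw [if_pos hany]
      obtain ⟨a, haK, hab⟩ := List.any_eq_true.mp hany
      rw [Bool.and_eq_true, Bool.not_eq_true'] at hab
      have haO : a ∈ O := (hOmem a).mpr ((hP a).mp hab.1)
      have hnotsub : PySem.Set.issubset (PySem.Set.ofList (O.map (fun a => PySem.Int.mod (a + d) m))) O = false := by
        rw [Bool.eq_false_iff]
        intro hc
        have h2 := (hQ a).mpr ((hsubset.mp hc) a haO)
        rw [hab.2] at h2
        cases h2
      rw [hnotsub, Bool.false_and, if_neg (by simp)]
    · rw [if_neg hany]
      have hnoBad : ∀ a ∈ O, PySem.Int.mod (a + d) m ∈ O := by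
        intro a haO
        have haodd := (hOmem a).mp haO
        by_contra hq
        refine hany (List.any_eq_true.mpr ⟨a, (hKmem a).mpr (hOsub a haodd), ?_⟩)
        rw [Bool.and_eq_true, Bool.not_eq_true']
        refine ⟨(hP a).mpr haodd, ?_⟩
        rw [Bool.eq_false_iff]
        intro hc
        exact hq ((hQ a).mp hc)
      rw [hsubset.mpr hnoBad, Bool.true_and]
      -- countP over K equals the size of O
      have hcount : (K.countP (fun a => (PySem.Int.mod ((PySem.Dict.counter a_list).getD a 0) 2 == 1) &&
          (PySem.Int.mod ((PySem.Dict.counter a_list).getD (PySem.Int.mod (a + d) m) 0) 2 == 1))) = O.length := by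
        have hnoBad' : ∀ a ∈ K, (PySem.Int.mod ((PySem.Dict.counter a_list).getD a 0) 2 == 1) = true →
            (PySem.Int.mod ((PySem.Dict.counter a_list).getD (PySem.Int.mod (a + d) m) 0) 2 == 1) = true := by
          intro a _ hp
          exact (hQ a).mpr (hnoBad a ((hOmem a).mpr ((hP a).mp hp)))
        rw [List.countP_eq_length_filter]
        have hfe : K.filter (fun a => (PySem.Int.mod ((PySem.Dict.counter a_list).getD a 0) 2 == 1) &&
            (PySem.Int.mod ((PySem.Dict.counter a_list).getD (PySem.Int.mod (a + d) m) 0) 2 == 1))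
            = K.filter (fun a => PySem.Int.mod ((PySem.Dict.counter a_list).getD a 0) 2 == 1) := by
          apply List.filter_congr
          intro a haK
          by_cases hp : (PySem.Int.mod ((PySem.Dict.counter a_list).getD a 0) 2 == 1) = true
          · rw [hp, hnoBad' a haK hp, Bool.true_and]
          · rw [Bool.eq_false_iff.mpr hp, Bool.false_and]
        rw [hfe]
        have hperm : (K.filter (fun a => PySem.Int.mod ((PySem.Dict.counter a_list).getD a 0) 2 == 1)).Perm O := by
          rw [List.perm_ext_iff_of_nodup (hKnd.filter _) hOnd]
          intro a
          rw [List.mem_filter, hOmem a]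
          constructor
          · rintro ⟨_, hp⟩; exact (hP a).mp hp
          · intro hodd; exact ⟨(hKmem a).mpr (hOsub a hodd), (hP a).mpr hodd⟩
        exact hperm.length_eq
      rw [hcount]
      have hlen : PySem.Set.len O = (O.length : Int) := by simp [PySem.Set.len]
      rw [hlen]
      by_cases h4 : (PySem.Int.mod ((O.length : Int)) 4 == 0) = true
      · rw [if_pos h4]
        rw [beq_iff_eq] at h4
        rw [if_neg (by simpa using h4)]
      · rw [if_neg h4]
        rw [if_pos (by simpa using (beq_iff_eq (a := PySem.Int.mod ((O.length : Int)) 4) (b := 0)).not.mp h4)]
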